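-- pv_equiv track=rewrite | github.com/msprev/dot-panzer | filter/metapub/formatter.py | concat_useinitials
-- ===== SOURCE A (Python) =====
-- def name2initials(name):
--    return ' '.join([n[0] + '.' for n in name.split()])
--
-- def concat_useinitials(l, sep, final_sep):
--     o = str()
--     # no one in list
--     if not l:
--         return o
--     # first person in list
--     o += name2initials(l[0]['name_first'])
--     o += ' '
--     o += l[0]['name_last']
--     if len(l) == 1:
--         return o
--     # everyone else until penultimate person
--     for i in range(1, len(l) - 1):
--         o += sep
--         o += name2initials(l[i]['name_first'])
--         o += ' '
--         o += l[i]['name_last']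
--     # last person in list
--     o += final_sep
--     o += name2initials(l[-1]['name_first'])
--     o += ' '
--     o += l[-1]['name_last']
--     return o
-- ===== SOURCE B (Python) =====
-- def concat_useinitials(l, sep, final_sep):
--     # build the pieces back-to-front: walk from the last person down to index 1,
--     # emitting each formatted name followed by the separator that precedes it,
--     # then reverse the pieces and join once
--     pieces = []
--     n = len(l)
--     i = n - 1
--     while i > 0:
--         p = l[i]
--         pieces.append(' '.join(w[0] + '.' for w in p['name_first'].split()) + ' ' + p['name_last'])
--         pieces.append(final_sep if i == n - 1 else sep)
--         i -= 1
--     if l: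
--         p = l[0]
--         pieces.append(' '.join(w[0] + '.' for w in p['name_first'].split()) + ' ' + p['name_last'])
--     pieces.reverse()
--     return ''.join(pieces)
-- ===== Notes on version B (the rewrite author's own statement) =====
-- stated objective: alternative
-- what changed: B builds the result back-to-front: a reverse while-loop from the last person down to index 1 pushes each formatted name and the separator that precedes it onto a pieces list, which is reversed once and joined, replacing A's forward accumulator string with its first-person prefix, middle index loop and trailing last-person block.
import Mathlib
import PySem

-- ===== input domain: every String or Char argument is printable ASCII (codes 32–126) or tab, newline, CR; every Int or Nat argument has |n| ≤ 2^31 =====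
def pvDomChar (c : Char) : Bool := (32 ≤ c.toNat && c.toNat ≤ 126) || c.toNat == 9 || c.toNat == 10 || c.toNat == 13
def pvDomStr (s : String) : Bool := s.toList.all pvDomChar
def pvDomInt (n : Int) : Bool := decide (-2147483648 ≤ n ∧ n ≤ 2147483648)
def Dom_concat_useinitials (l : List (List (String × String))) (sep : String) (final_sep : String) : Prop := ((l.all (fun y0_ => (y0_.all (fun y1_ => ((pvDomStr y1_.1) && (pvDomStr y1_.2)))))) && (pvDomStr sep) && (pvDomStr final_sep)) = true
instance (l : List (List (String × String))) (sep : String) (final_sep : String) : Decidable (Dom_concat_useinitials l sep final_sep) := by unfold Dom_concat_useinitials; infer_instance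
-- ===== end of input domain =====

-- B builds the output back-to-front (reverse while-loop pushing name/separator pieces, one reverse + join) instead of A's forward accumulator string (alternative decomposition, same cost).

-- shared helper: first-match dict lookup, and the per-person formatting
-- "' '.join(w[0] + '.' for w in p['name_first'].split()) + ' ' + p['name_last']" that both Pythons compute verbatim
def pvLookup (d : List (String × String)) (k : String) : Option String :=
  (d.find? (fun p => p.1 == k)).map (fun p => p.2)

-- ' '.join([n[0] + '.' for n in name.split()]); split() tokens are nonempty, so n[0] never raises
def pvName2Initials (name : List Char) : List Char :=
  PySem.Chars.join [' ']
    ((PySem.Chars.split₀ name).map (fun n => ((PySem.List.pyGet? n 0).getD ' ') :: ['.']))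

-- the '.getD' defaults are only reached outside Pre_ (missing key = Python KeyError)
def pvFmtPerson (d : List (String × String)) : List Char :=
  pvName2Initials ((pvLookup d "name_first").getD "").toList
    ++ [' '] ++ ((pvLookup d "name_last").getD "").toList

-- ===== PORT A =====
def concat_useinitials (l : List (List (String × String))) (sep : String) (final_sep : String) : String :=
  if l.isEmpty then "" else
  let o := pvFmtPerson ((PySem.List.pyGet? l 0).getD [])
  if l.length == 1 then String.ofList o else
  let o := (PySem.List.pyRange 1 ((l.length : Int) - 1)).foldl
      (fun acc i => acc ++ sep.toList ++ pvFmtPerson (PySem.List.pyGetD l i [])) o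
  String.ofList (o ++ final_sep.toList ++ pvFmtPerson ((PySem.List.pyGet? l (-1)).getD []))

-- ===== PORT B =====
-- the 'while i > 0' loop: structural recursion on i; each step appends the
-- formatted name l[i] and then the separator that precedes it
def pvBackLoop (l : List (List (String × String))) (s f : List Char) :
    Nat → List (List Char) → List (List Char)
  | 0, pieces => pieces
  | j+1, pieces =>
      pvBackLoop l s f j
        (pieces ++ [pvFmtPerson (l.getD (j+1) []), if j+1 == l.length - 1 then f else s])

def concat_useinitials_alt (l : List (List (String × String))) (sep : String) (final_sep : String) : String :=
  String.ofList (PySem.Chars.join []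
    ((if l.isEmpty then pvBackLoop l sep.toList final_sep.toList (l.length - 1) []
      else pvBackLoop l sep.toList final_sep.toList (l.length - 1) []
           ++ [pvFmtPerson (l.getD 0 [])]).reverse))

-- ===== PRECONDITION & SPEC =====
-- Pre_ excludes exactly the person dicts missing a 'name_first' or 'name_last' key, on which Python A raises KeyError
def Pre_concat_useinitials (l : List (List (String × String))) (sep : String) (final_sep : String) : Prop :=
  (l.all (fun d => d.any (fun p => p.1 == "name_first") && d.any (fun p => p.1 == "name_last"))) = true
instance (l : List (List (String × String))) (sep : String) (final_sep : String) : Decidable (Pre_concat_useinitials l sep final_sep) := by unfold Pre_concat_useinitials; infer_instance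

def pvWitness_concat_useinitials : (List (List (String × String))) × String × String :=
  ([[("name_first", "Ada B"), ("name_last", "Lovelace")], [("name_first", "Bo"), ("name_last", "Li")]], ", ", " and ")

def Spec_concat_useinitials (l : List (List (String × String))) (sep : String) (final_sep : String) (out : String) : Prop := out = concat_useinitials_alt l sep final_sep
instance (l : List (List (String × String))) (sep : String) (final_sep : String) (out : String) : Decidable (Spec_concat_useinitials l sep final_sep out) := by unfold Spec_concat_useinitials; infer_instance

-- ===== CLAIM (what is proved, stated in full; the proofs are below) =====
def Claim_equal_concat_useinitials : Prop := ∀ (l : List (List (String × String))) (sep : String) (final_sep : String), Dom_concat_useinitials l sep final_sep → Pre_concat_useinitials l sep final_sep → Spec_concat_useinitials l sep final_sep (concat_useinitials l sep final_sep)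

-- ===== LEMMAS AND PROOFS =====

theorem pv_pyGet?_neg_one {α : Type} (xs : List α) (h : xs ≠ []) :
    PySem.List.pyGet? xs (-1) = xs.getLast? := by
  have hl : 1 ≤ xs.length := List.length_pos_iff.mpr h
  simp [PySem.List.pyGet?, PySem.List.pyIdx?, hl, List.getLast?_eq_getElem?]

theorem pv_join_eq_flatMap (s x : List Char) (xs : List (List Char)) :
    PySem.Chars.join s (x :: xs) = x ++ xs.flatMap (fun y => s ++ y) := by
  induction xs generalizing x with
  | nil => simp [PySem.Chars.join_singleton]
  | cons y ys ih => rw [PySem.Chars.join_cons_cons, ih]; simp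

-- characterisation of A's middle loop: the separated middle people, flattened
theorem pv_middle_foldl (l : List (List (String × String))) (s : List Char)
    (o : List Char) (h : l ≠ []) :
    (PySem.List.pyRange 1 ((l.length : Int) - 1)).foldl
        (fun acc i => acc ++ s ++ pvFmtPerson (PySem.List.pyGetD l i [])) o
    = o ++ (l.dropLast.drop 1).flatMap (fun p => s ++ pvFmtPerson p) := by
  have hlen : ((l.length : Int) - 1) = ((l.dropLast.length : Int)) := by
    have := List.length_pos_iff.mpr h
    simp [List.length_dropLast]; omega
  rw [hlen]
  rw [PySem.List.foldl_congr_mem _ _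
      (fun acc i => acc ++ (s ++ pvFmtPerson (PySem.List.pyGetD l.dropLast i []))) o ?_]
  · rw [PySem.List.foldl_pyRange_pyGetD' l.dropLast [] (fun acc p => acc ++ (s ++ pvFmtPerson p)) o (by norm_num)]
    rw [PySem.List.foldl_append_eq_flatMap]
    norm_num
  · intro acc i hi
    rw [PySem.List.mem_pyRange_one] at hi
    have h0 : (0:Int) ≤ i := by omega
    have h1 : i < (l.dropLast.length : Int) := hi.2
    have h1' : i < (l.length : Int) := by simp [List.length_dropLast] at h1; omega
    simp only []
    rw [PySem.List.pyGetD_eq_getElem l.dropLast _ h0 h1, PySem.List.pyGetD_eq_getElem l _ h0 h1']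
    rw [List.getElem_dropLast]
    simp [List.append_assoc]

-- the pieces emitted by B's backward loop from index j down to 1 (newest first)
def pvG (l : List (List (String × String))) (s f : List Char) : Nat → List (List Char)
  | 0 => []
  | j+1 => [pvFmtPerson (l.getD (j+1) []), if j+1 == l.length - 1 then f else s] ++ pvG l s f j

theorem pvBackLoop_eq_pvG (l : List (List (String × String))) (s f : List Char) :
    ∀ j pieces, pvBackLoop l s f j pieces = pieces ++ pvG l s f j := by
  intro j
  induction j with
  | zero => intro pieces; simp [pvBackLoop, pvG]
  | succ j ih => intro pieces; rw [pvBackLoop, ih, pvG]; simp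

theorem pvG_reverse_flatten (l : List (List (String × String))) (s f : List Char) :
    ∀ j, ((pvG l s f j).reverse).flatten
      = (List.range' 1 j).flatMap
          (fun i => (if i == l.length - 1 then f else s) ++ pvFmtPerson (l.getD i [])) := by
  intro j
  induction j with
  | zero => simp [pvG]
  | succ j ih =>
    rw [pvG, List.range'_concat]
    simp only [List.reverse_append, List.flatten_append, List.flatMap_append, ih]
    have h11 : 1 + 1 * j = j + 1 := by omega
    rw [h11]
    simp

-- indices 1..k of l, as the slice (l.drop 1).take k
theorem pv_map_range'_getD (l : List (List (String × String))) :
    ∀ (k a : Nat), a + k ≤ l.length →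
      (List.range' a k).map (fun i => l.getD i []) = (l.drop a).take k := by
  intro k
  induction k with
  | zero => intro a _; simp
  | succ k ih =>
    intro a h
    have ha : a < l.length := by omega
    rw [List.range'_succ, List.map_cons, ih (a+1) (by omega)]
    rw [List.drop_eq_getElem_cons ha, List.take_succ_cons, List.getD_eq_getElem l [] ha]

-- ===== VERDICT (by name: the statement is the Claim_ definition above) =====
theorem concat_useinitials_spec : Claim_equal_concat_useinitials := by
  intro l sep fs _ _
  unfold Spec_concat_useinitials concat_useinitials concat_useinitials_alt
  match l with
  | [] => rfl
  | [d0] =>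
    simp [PySem.List.pyGet?, PySem.List.pyIdx?, pvBackLoop, PySem.Chars.join_singleton]
  | d0 :: d1 :: rest =>
    have hne : (d0 :: d1 :: rest : List (List (String × String))) ≠ [] := by simp
    -- A side
    have hget0 : PySem.List.pyGet? (d0 :: d1 :: rest) 0 = some d0 := by
      have hp : (0:Int) ≤ (rest.length : Int) + 1 := by positivity
      simp [PySem.List.pyGet?, PySem.List.pyIdx?, hp]
    simp only [List.isEmpty_cons, Bool.false_eq_true, if_false, List.length_cons]
    rw [if_neg (by simp)]
    have hb : ((rest.length + 1 + 1 : Nat) : Int) - 1 = (((d0 :: d1 :: rest).length : Int)) - 1 := by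
      simp
    rw [hget0, hb, Option.getD_some]
    rw [pv_middle_foldl _ _ _ hne]
    rw [pv_pyGet?_neg_one _ hne, List.getLast?_eq_some_getLast hne, Option.getD_some]
    -- B side
    have hlen1 : (rest.length + 1 + 1) - 1 = rest.length + 1 := by omega
    rw [hlen1, pvBackLoop_eq_pvG]
    have hgd0 : (d0 :: d1 :: rest).getD 0 [] = d0 := by simp
    rw [hgd0]
    rw [List.nil_append, List.reverse_append]
    have hrev1 : ([pvFmtPerson d0] : List (List Char)).reverse = [pvFmtPerson d0] := by simp
    rw [hrev1, List.singleton_append, pv_join_eq_flatMap]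
    have hflat : ((pvG (d0 :: d1 :: rest) sep.toList fs.toList (rest.length + 1)).reverse).flatMap (fun y => ([] : List Char) ++ y)
        = ((pvG (d0 :: d1 :: rest) sep.toList fs.toList (rest.length + 1)).reverse).flatten := by
      simp [List.flatMap_def]
    rw [hflat, pvG_reverse_flatten]
    -- split off the last index rest.length + 1
    rw [List.range'_concat, List.flatMap_append]
    have hN : (d0 :: d1 :: rest).length - 1 = rest.length + 1 := by simp
    -- the final piece uses final_sep and the last person
    have hlast : (d0 :: d1 :: rest).getD (rest.length + 1) [] = (d0 :: d1 :: rest).getLast hne := by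
      rw [List.getD_eq_getElem _ [] (by simp), List.getLast_eq_getElem]
      simp
    -- middle indices never equal the last index
    have hmid : (List.range' 1 rest.length).flatMap
          (fun i => (if i == (d0 :: d1 :: rest).length - 1 then fs.toList else sep.toList) ++ pvFmtPerson ((d0 :: d1 :: rest).getD i []))
        = (List.range' 1 rest.length).flatMap
          (fun i => sep.toList ++ pvFmtPerson ((d0 :: d1 :: rest).getD i [])) := by
      rw [List.flatMap_def, List.flatMap_def]
      congr 1
      apply List.map_congr_left
      intro i hi
      rw [List.mem_range'] at hi
      obtain ⟨k, hk, hik⟩ := hi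
      have hineq : (i == (d0 :: d1 :: rest).length - 1) = false := by
        rw [hN]; simp; omega
      rw [hineq]
      simp
    rw [hmid]
    -- middle flatMap over indices = flatMap over the middle people
    have hmid2 : (List.range' 1 rest.length).flatMap
          (fun i => sep.toList ++ pvFmtPerson ((d0 :: d1 :: rest).getD i []))
        = ((d0 :: d1 :: rest).dropLast.drop 1).flatMap (fun p => sep.toList ++ pvFmtPerson p) := by
      rw [List.flatMap_def]
      have hm := pv_map_range'_getD (d0 :: d1 :: rest) rest.length 1 (by simp only [List.length_cons]; omega)
      have hmap : (List.range' 1 rest.length).map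
            (fun i => sep.toList ++ pvFmtPerson ((d0 :: d1 :: rest).getD i []))
          = ((List.range' 1 rest.length).map (fun i => (d0 :: d1 :: rest).getD i [])).map
            (fun p => sep.toList ++ pvFmtPerson p) := by
        rw [List.map_map]
        rfl
      rw [hmap, hm]
      have hdl : (d0 :: d1 :: rest).dropLast.drop 1 = ((d0 :: d1 :: rest).drop 1).take rest.length := by
        rw [List.dropLast_eq_take, List.drop_take]
        simp
      rw [hdl, List.flatMap_def]
    rw [hmid2]
    have h1r : (1 : Nat) + 1 * rest.length = rest.length + 1 := by omega
    rw [h1r]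
    have hjoinlast : (if ((rest.length + 1 : Nat) == (d0 :: d1 :: rest).length - 1) = true then fs.toList else sep.toList) = fs.toList := by
      rw [hN]
      simp
    rw [List.flatMap_singleton]
    rw [hjoinlast, hlast]
    simp [List.append_assoc]
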